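-- pv_equiv track=rewrite | github.com/shalb/airflow-exporter | exporter/exporter.py | label_clean
-- ===== SOURCE A (Python) =====
-- def label_clean(label):
--     replace_map = {
--         '\\': '',
--         '"': '',
--         '\n': '',
--         '\t': '',
--         '\r': '',
--         '-': '_',
--         ' ': '_'
--     }
--     for r in replace_map:
--         label = str(label).replace(r, replace_map[r])
--     return label
-- ===== SOURCE B (Python) =====
-- def label_clean(label):
--     return ''.join(
--         '' if ch in '\\"\n\t\r' else '_' if ch in '- ' else ch
--         for ch in str(label)
--     )
-- ===== Notes on version B (the rewrite author's own statement) =====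
-- stated objective: idiomatic
-- what changed: Replaces seven sequential whole-string .replace() passes with one character-by-character pass that joins each character's substitution ('' for the five stripped characters, '_' for '-' and ' '); equivalent because no substitution output is itself a replaced character.
import Mathlib
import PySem

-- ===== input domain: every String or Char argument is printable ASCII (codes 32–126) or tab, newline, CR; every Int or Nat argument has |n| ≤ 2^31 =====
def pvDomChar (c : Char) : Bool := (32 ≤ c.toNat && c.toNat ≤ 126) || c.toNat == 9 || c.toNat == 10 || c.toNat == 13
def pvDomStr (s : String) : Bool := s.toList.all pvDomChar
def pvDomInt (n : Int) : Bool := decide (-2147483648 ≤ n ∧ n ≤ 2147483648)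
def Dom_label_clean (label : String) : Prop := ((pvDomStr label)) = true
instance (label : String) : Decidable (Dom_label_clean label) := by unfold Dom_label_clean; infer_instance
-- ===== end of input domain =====

-- B replaces A's seven sequential whole-string replace passes with one character-by-character
-- pass; equivalent because no substitution output is itself a replaced character.

-- ===== PORT A =====
-- seven sequential replaces, in the dict's insertion order (str(label) on a String is identity)
def label_clean (label : String) : String :=
  let l1 := PySem.Str.replace label "\\" ""
  let l2 := PySem.Str.replace l1 "\"" ""
  let l3 := PySem.Str.replace l2 "\n" ""
  let l4 := PySem.Str.replace l3 "\t" ""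
  let l5 := PySem.Str.replace l4 "\r" ""
  let l6 := PySem.Str.replace l5 "-" "_"
  PySem.Str.replace l6 " " "_"

-- ===== PORT B =====
-- 'ch in <literal str>' for a single char is membership in the literal's characters (exact)
def labelCleanPiece (ch : Char) : List Char :=
  if ("\\\"\n\t\r".toList.contains ch) then []
  else if (['-', ' '].contains ch) then ['_']
  else [ch]

-- ''.join of the per-character pieces = flatMap of their character lists
def label_clean_alt (label : String) : String :=
  String.ofList (label.toList.flatMap labelCleanPiece)

-- ===== PRECONDITION & SPEC =====
def Spec_label_clean (label : String) (out : String) : Prop := out = label_clean_alt label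
instance (label : String) (out : String) : Decidable (Spec_label_clean label out) := by unfold Spec_label_clean; infer_instance

-- ===== CLAIM (what is proved, stated in full; the proofs are below) =====
def Claim_equal_label_clean : Prop := ∀ (label : String), Dom_label_clean label → Spec_label_clean label (label_clean label)

-- ===== LEMMAS AND PROOFS =====

-- single-character replacement pointwise map
def rep1f (a : Char) (r : List Char) (c : Char) : List Char := if c = a then r else [c]

lemma replace_go_single (a : Char) (r : List Char) :
    ∀ (l : List Char) (fuel : Nat) (acc : List Char), l.length ≤ fuel →
      PySem.Chars.replace.go [a] r fuel l acc = acc.reverse ++ l.flatMap (rep1f a r) := by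
  intro l
  induction l with
  | nil =>
    intro fuel acc _
    cases fuel <;> simp [PySem.Chars.replace.go]
  | cons c t ih =>
    intro fuel acc h
    cases fuel with
    | zero => simp at h
    | succ n =>
      rw [PySem.Chars.replace.go]
      by_cases hc : a = c
      · have hp : [a].isPrefixOf (c :: t) = true := by
          simp [List.isPrefixOf, hc]
        rw [if_pos hp]
        simp only [List.length_nil, List.length_cons, List.drop_succ_cons, List.drop_zero]
        rw [ih n (r.reverse ++ acc) (by simpa using Nat.le_of_succ_le_succ h)]
        simp [rep1f, hc.symm]
      · have hp : [a].isPrefixOf (c :: t) = false := by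
          simp [List.isPrefixOf]
          exact hc
        rw [if_neg (by simp [hp])]
        rw [ih n (c :: acc) (by simpa using Nat.le_of_succ_le_succ h)]
        have hne : ¬ c = a := fun h => hc h.symm
        simp [rep1f, hne]

lemma replace_single (a : Char) (r : List Char) (s : List Char) :
    PySem.Chars.replace s [a] r = s.flatMap (rep1f a r) := by
  rw [PySem.Chars.replace]
  simp only [List.isEmpty_cons, if_false]
  simpa using replace_go_single a r s s.length [] (le_refl _)

lemma chain_char (c : Char) :
    ((((((rep1f '\\' [] c).flatMap (rep1f '"' [])).flatMap (rep1f '\n' [])).flatMap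
        (rep1f '\t' [])).flatMap (rep1f '\r' [])).flatMap (rep1f '-' ['_'])).flatMap
        (rep1f ' ' ['_']) = labelCleanPiece c := by
  by_cases h1 : c = '\\'
  · subst h1; decide
  by_cases h2 : c = '"'
  · subst h2; decide
  by_cases h3 : c = '\n'
  · subst h3; decide
  by_cases h4 : c = '\t'
  · subst h4; decide
  by_cases h5 : c = '\r'
  · subst h5; decide
  by_cases h6 : c = '-'
  · subst h6; decide
  by_cases h7 : c = ' '
  · subst h7; decide
  simp [rep1f, labelCleanPiece, h1, h2, h3, h4, h5, h6, h7]


-- ===== VERDICT (by name: the statement is the Claim_ definition above) =====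
theorem label_clean_spec : Claim_equal_label_clean := by
  intro label _
  unfold Spec_label_clean label_clean label_clean_alt
  apply String.toList_inj.mp
  rw [PySem.Str.toList_replace, PySem.Str.toList_replace, PySem.Str.toList_replace,
      PySem.Str.toList_replace, PySem.Str.toList_replace, PySem.Str.toList_replace,
      PySem.Str.toList_replace]
  simp only [show ("" : String).toList = [] from rfl, show ("_" : String).toList = ['_'] from rfl,
      show ("\\" : String).toList = ['\\'] from rfl, show ("\"" : String).toList = ['"'] from rfl,
      show ("\n" : String).toList = ['\n'] from rfl, show ("\t" : String).toList = ['\t'] from rfl,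
      show ("\r" : String).toList = ['\r'] from rfl, show ("-" : String).toList = ['-'] from rfl,
      show (" " : String).toList = [' '] from rfl, String.toList_ofList]
  rw [replace_single, replace_single, replace_single, replace_single, replace_single,
      replace_single, replace_single]
  rw [List.flatMap_assoc, List.flatMap_assoc, List.flatMap_assoc, List.flatMap_assoc,
      List.flatMap_assoc, List.flatMap_assoc]
  refine List.flatMap_congr ?_
  intro c _
  simpa [List.flatMap_assoc] using chain_char c
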